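-- pv_equiv track=rewrite | github.com/sgl-project/sglang | python/sglang/srt/layers/attention/nsa/utils.py | calculate_cp_seq_idx
-- ===== SOURCE A (Python) =====
-- def calculate_cp_seq_idx(cp_chunks_len, seqs_len):
--     """Used to obtain the index of the seq corresponding
--     to each cp block in the forwardbatch, and the starting
--     and ending positions of the corresponding seq in the cp block"""
--     j = 0
--     tuple_len = []  # Only keep this result list
--     cumulative = {}  # Used to track cumulative values for each index
--
--     for i in range(len(cp_chunks_len)):
--         current_dict = {}
--         current_tuples = []
--         c_val = cp_chunks_len[i]
--
--         while j < len(seqs_len):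
--             s_val = seqs_len[j]
--             if s_val == c_val:
--                 idx = j
--                 current_dict[idx] = s_val
--                 # Update cumulative value for this index
--                 cumulative[idx] = cumulative.get(idx, 0) + s_val
--                 j += 1
--                 break
--             elif s_val > c_val:
--                 idx = j
--                 current_dict[idx] = c_val
--                 # Update cumulative value for this index
--                 cumulative[idx] = cumulative.get(idx, 0) + c_val
--                 seqs_len[j] = s_val - c_val
--                 break
--             else:  # s_val < c_val
--                 idx = j
--                 current_dict[idx] = s_val
--                 # Update cumulative value for this index
--                 cumulative[idx] = cumulative.get(idx, 0) + s_val
--                 c_val -= s_val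
--                 j += 1
--
--         # Build tuple: (index, historical cumulative, historical+current)
--         for idx, val in current_dict.items():
--             # Subtract current value to get historical cumulative
--             prev_cum = cumulative.get(idx, 0) - val
--             current_cum = prev_cum + val
--             current_tuples.append((idx, prev_cum, current_cum))
--
--         tuple_len.append(current_tuples)
--     return tuple_len
-- ===== SOURCE B (Python) =====
-- def calculate_cp_seq_idx(cp_chunks_len, seqs_len):
--     """Transposed (seq-major) merge: the outer loop walks the seqs and the
--     inner loop consumes chunks from a stack of still-unfinished chunk
--     capacities, so the two dicts and the post-loop reconstruction of A
--     disappear; finished per-chunk buckets are emitted in order and the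
--     still-open/untouched chunks are padded at the end.
--     Mutates seqs_len in place exactly like the original."""
--     out = []                     # finished per-chunk tuple lists, in order
--     cur = []                     # tuples of the chunk currently being filled
--     rest = cp_chunks_len[::-1]   # unfinished chunks as a stack (top = next)
--     for j, s in enumerate(seqs_len):
--         consumed = 0
--         while rest:
--             c = rest[-1]
--             if s == c:
--                 cur.append((j, consumed, consumed + s))
--                 rest.pop()
--                 out.append(cur)
--                 cur = []
--                 break
--             elif s > c:
--                 cur.append((j, consumed, consumed + c))
--                 consumed += c
--                 s -= c
--                 seqs_len[j] = s
--                 rest.pop()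
--                 out.append(cur)
--                 cur = []
--             else:  # s < c: seq exhausted inside the current chunk
--                 cur.append((j, consumed, consumed + s))
--                 rest[-1] = c - s
--                 break
--     if rest:
--         out.append(cur)
--         out.extend([] for _ in rest[:-1])
--     return out
-- ===== Notes on version B (the rewrite author's own statement) =====
-- stated objective: alternative
-- what changed: Transposed the merge: B iterates seq-major (outer loop over seqs, inner loop consuming a stack of unfinished chunk capacities) instead of A's chunk-major loop with a pointer into seqs, eliminating both dicts and A's post-loop tuple reconstruction; finished buckets are appended in order and untouched chunks padded at the end.
import Mathlib
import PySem

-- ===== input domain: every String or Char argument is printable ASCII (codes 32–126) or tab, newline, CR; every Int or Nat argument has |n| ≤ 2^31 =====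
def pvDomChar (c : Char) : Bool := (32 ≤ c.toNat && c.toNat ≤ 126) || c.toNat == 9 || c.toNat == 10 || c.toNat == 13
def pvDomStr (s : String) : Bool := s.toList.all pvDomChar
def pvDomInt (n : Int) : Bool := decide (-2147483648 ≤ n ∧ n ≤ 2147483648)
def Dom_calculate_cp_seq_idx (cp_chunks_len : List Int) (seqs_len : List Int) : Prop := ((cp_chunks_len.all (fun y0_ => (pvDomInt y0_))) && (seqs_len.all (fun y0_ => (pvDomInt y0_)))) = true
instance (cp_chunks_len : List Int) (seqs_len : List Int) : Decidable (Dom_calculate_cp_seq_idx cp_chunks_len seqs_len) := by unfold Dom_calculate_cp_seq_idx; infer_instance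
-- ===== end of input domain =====

-- B transposes A's merge: instead of A's chunk-major loop (pointer j into seqs, per-chunk
-- current_dict + global cumulative dict + post-loop tuple reconstruction), B walks the seqs
-- (seq-major) and consumes a stack of still-unfinished chunk capacities, appending each tuple
-- where it is produced (objective: alternative decomposition, no dicts). Both Pythons mutate
-- the argument seqs_len in place identically; the equivalence proved here is about the return
-- value (the Lean ports thread the list as a value, in both the same way).

-- ===== PORT A =====
-- the inner `while j < len(seqs_len)` loop of A; state (seqs_len, j, cumulative, current_dict)
def pvWhileA (seqs : List Int) (j : Nat) (c_val : Int) (cum : PySem.Dict Int Int)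
    (cur : PySem.Dict Int Int) : List Int × Nat × PySem.Dict Int Int × PySem.Dict Int Int :=
  if _h : j < seqs.length then
    let s_val := seqs.getD j 0
    if s_val = c_val then
      (seqs, j + 1, cum.insert (j : Int) (cum.getD (j : Int) 0 + s_val), cur.insert (j : Int) s_val)
    else if s_val > c_val then
      (seqs.set j (s_val - c_val), j, cum.insert (j : Int) (cum.getD (j : Int) 0 + c_val),
        cur.insert (j : Int) c_val)
    else
      pvWhileA seqs (j + 1) (c_val - s_val)
        (cum.insert (j : Int) (cum.getD (j : Int) 0 + s_val)) (cur.insert (j : Int) s_val)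
  else (seqs, j, cum, cur)
termination_by seqs.length - j

-- the outer `for i in range(len(cp_chunks_len))` loop of A, with the post-loop tuple build
def pvLoopA : List Int → List Int → Nat → PySem.Dict Int Int →
    List (List (Int × Int × Int)) → List (List (Int × Int × Int))
  | [], _, _, _, acc => acc.reverse
  | c_val :: rest, seqs, j, cum, acc =>
    let r := pvWhileA seqs j c_val cum PySem.Dict.empty
    let current_tuples := r.2.2.2.items.map (fun p =>
      let prev_cum := r.2.2.1.getD p.1 0 - p.2
      let current_cum := prev_cum + p.2
      (p.1, prev_cum, current_cum))
    pvLoopA rest r.1 r.2.1 r.2.2.1 (current_tuples :: acc)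

def calculate_cp_seq_idx (cp_chunks_len : List Int) (seqs_len : List Int) :
    List (List (Int × Int × Int)) :=
  pvLoopA cp_chunks_len seqs_len 0 PySem.Dict.empty []

-- ===== PORT B =====
-- B's inner `while rest:` loop. Python keeps `rest` as cp_chunks_len[::-1] and pops from the
-- END; the port keeps the same stack with its top FIRST and consumes the head — same contents,
-- same order of consumption. State: (rest, cur, out, seqs_len); `s`/`consumed` are the locals.
def pvInnerB (rest : List Int) (j : Nat) (s consumed : Int) (cur : List (Int × Int × Int))
    (out : List (List (Int × Int × Int))) (seqs : List Int) :
    List Int × List (Int × Int × Int) × List (List (Int × Int × Int)) × List Int :=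
  match rest with
  | [] => ([], cur, out, seqs)
  | c :: rs =>
    if s = c then
      (rs, [], out ++ [cur ++ [((j : Int), consumed, consumed + s)]], seqs)
    else if s > c then
      pvInnerB rs j (s - c) (consumed + c) []
        (out ++ [cur ++ [((j : Int), consumed, consumed + c)]]) (seqs.set j (s - c))
    else
      ((c - s) :: rs, cur ++ [((j : Int), consumed, consumed + s)], out, seqs)

-- B's outer `for j, s in enumerate(seqs_len)` loop; the recursion walks the initial list,
-- which is faithful because the in-place writes are only ever at the current index j, never
-- at an index still to be read.
def pvOuterB : List Int → Nat → List Int → List (Int × Int × Int) →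
    List (List (Int × Int × Int)) → List Int →
    List Int × List (Int × Int × Int) × List (List (Int × Int × Int))
  | [], _, rest, cur, out, _ => (rest, cur, out)
  | s :: ss, j, rest, cur, out, seqs =>
    let r := pvInnerB rest j s 0 cur out seqs
    pvOuterB ss (j + 1) r.1 r.2.1 r.2.2.1 r.2.2.2

def calculate_cp_seq_idx_alt (cp_chunks_len : List Int) (seqs_len : List Int) :
    List (List (Int × Int × Int)) :=
  let r := pvOuterB seqs_len 0 cp_chunks_len [] [] seqs_len
  match r.1 with
  | [] => r.2.2
  | _ :: rs => r.2.2 ++ [r.2.1] ++ rs.map (fun _ => ([] : List (Int × Int × Int)))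

-- ===== PRECONDITION & SPEC =====
def Spec_calculate_cp_seq_idx (cp_chunks_len : List Int) (seqs_len : List Int) (out : List (List (Int × Int × Int))) : Prop := out = calculate_cp_seq_idx_alt cp_chunks_len seqs_len
instance (cp_chunks_len : List Int) (seqs_len : List Int) (out : List (List (Int × Int × Int))) : Decidable (Spec_calculate_cp_seq_idx cp_chunks_len seqs_len out) := by unfold Spec_calculate_cp_seq_idx; infer_instance

-- ===== CLAIM (what is proved, stated in full; the proofs are below) =====
def Claim_equal_calculate_cp_seq_idx : Prop := ∀ (cp_chunks_len : List Int) (seqs_len : List Int), Dom_calculate_cp_seq_idx cp_chunks_len seqs_len → Spec_calculate_cp_seq_idx cp_chunks_len seqs_len (calculate_cp_seq_idx cp_chunks_len seqs_len)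

-- ===== LEMMAS AND PROOFS =====

-- chunk-major intermediate: A's loop with the tuples built inline and one consumed-dict
def pvWhileI (seqs : List Int) (j : Nat) (c_val : Int) (consumed : PySem.Dict Int Int)
    (cur : List (Int × Int × Int)) :
    List Int × Nat × PySem.Dict Int Int × List (Int × Int × Int) :=
  if _h : j < seqs.length then
    let s_val := seqs.getD j 0
    if s_val = c_val then
      let prev := consumed.getD (j : Int) 0
      (seqs, j + 1, consumed.insert (j : Int) (prev + s_val),
        cur ++ [((j : Int), prev, prev + s_val)])
    else if s_val > c_val then
      let prev := consumed.getD (j : Int) 0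
      (seqs.set j (s_val - c_val), j, consumed.insert (j : Int) (prev + c_val),
        cur ++ [((j : Int), prev, prev + c_val)])
    else
      let prev := consumed.getD (j : Int) 0
      pvWhileI seqs (j + 1) (c_val - s_val) (consumed.insert (j : Int) (prev + s_val))
        (cur ++ [((j : Int), prev, prev + s_val)])
  else (seqs, j, consumed, cur)
termination_by seqs.length - j

def pvLoopI : List Int → List Int → Nat → PySem.Dict Int Int →
    List (List (Int × Int × Int)) → List (List (Int × Int × Int))
  | [], _, _, _, acc => acc.reverse
  | c_val :: rest, seqs, j, consumed, acc =>
    let r := pvWhileI seqs j c_val consumed []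
    pvLoopI rest r.1 r.2.1 r.2.2.1 (r.2.2.2 :: acc)

-- chunk-major loop with the scalar consumed-counter
def pvWhileS (seqs : List Int) (j : Nat) (c p : Int) (ts : List (Int × Int × Int)) :
    List Int × Nat × Int × List (Int × Int × Int) :=
  if _h : j < seqs.length then
    let s := seqs.getD j 0
    if s = c then (seqs, j + 1, 0, ts ++ [((j : Int), p, p + s)])
    else if s > c then (seqs.set j (s - c), j, p + c, ts ++ [((j : Int), p, p + c)])
    else pvWhileS seqs (j + 1) (c - s) 0 (ts ++ [((j : Int), p, p + s)])
  else (seqs, j, p, ts)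
termination_by seqs.length - j

-- ---- branch-unfold lemmas for the three while-loops ----

lemma whileA_stop (seqs : List Int) (j : Nat) (c : Int) (cum cur : PySem.Dict Int Int)
    (hj : ¬ j < seqs.length) : pvWhileA seqs j c cum cur = (seqs, j, cum, cur) := by
  rw [pvWhileA]; simp [hj]

lemma whileA_eq (seqs : List Int) (j : Nat) (c : Int) (cum cur : PySem.Dict Int Int)
    (hj : j < seqs.length) (h1 : seqs.getD j 0 = c) :
    pvWhileA seqs j c cum cur =
      (seqs, j + 1, cum.insert (j : Int) (cum.getD (j : Int) 0 + c),
        cur.insert (j : Int) c) := by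
  have hg : seqs.getD j 0 = seqs[j] := by
    simp [List.getD_eq_getElem?_getD, List.getElem?_eq_getElem hj]
  rw [hg] at h1
  rw [pvWhileA]; simp [hj, hg, h1]

lemma whileA_gt (seqs : List Int) (j : Nat) (c : Int) (cum cur : PySem.Dict Int Int)
    (hj : j < seqs.length) (h1 : ¬ seqs.getD j 0 = c) (h2 : seqs.getD j 0 > c) :
    pvWhileA seqs j c cum cur =
      (seqs.set j (seqs.getD j 0 - c), j,
        cum.insert (j : Int) (cum.getD (j : Int) 0 + c), cur.insert (j : Int) c) := by
  have hg : seqs.getD j 0 = seqs[j] := by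
    simp [List.getD_eq_getElem?_getD, List.getElem?_eq_getElem hj]
  rw [hg] at h1 h2
  rw [pvWhileA]; simp [hj, hg, h1, h2]

lemma whileA_lt (seqs : List Int) (j : Nat) (c : Int) (cum cur : PySem.Dict Int Int)
    (hj : j < seqs.length) (h1 : ¬ seqs.getD j 0 = c) (h2 : ¬ seqs.getD j 0 > c) :
    pvWhileA seqs j c cum cur =
      pvWhileA seqs (j + 1) (c - seqs.getD j 0)
        (cum.insert (j : Int) (cum.getD (j : Int) 0 + seqs.getD j 0))
        (cur.insert (j : Int) (seqs.getD j 0)) := by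
  have hg : seqs.getD j 0 = seqs[j] := by
    simp [List.getD_eq_getElem?_getD, List.getElem?_eq_getElem hj]
  rw [hg] at h1 h2
  rw [pvWhileA]; simp [hj, hg, h1, h2]

lemma whileI_stop (seqs : List Int) (j : Nat) (c : Int) (d : PySem.Dict Int Int)
    (ts : List (Int × Int × Int)) (hj : ¬ j < seqs.length) :
    pvWhileI seqs j c d ts = (seqs, j, d, ts) := by
  rw [pvWhileI]; simp [hj]

lemma whileI_eq (seqs : List Int) (j : Nat) (c : Int) (d : PySem.Dict Int Int)
    (ts : List (Int × Int × Int)) (hj : j < seqs.length) (h1 : seqs.getD j 0 = c) :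
    pvWhileI seqs j c d ts =
      (seqs, j + 1, d.insert (j : Int) (d.getD (j : Int) 0 + c),
        ts ++ [((j : Int), d.getD (j : Int) 0, d.getD (j : Int) 0 + c)]) := by
  have hg : seqs.getD j 0 = seqs[j] := by
    simp [List.getD_eq_getElem?_getD, List.getElem?_eq_getElem hj]
  rw [hg] at h1
  rw [pvWhileI]; simp [hj, hg, h1]

lemma whileI_gt (seqs : List Int) (j : Nat) (c : Int) (d : PySem.Dict Int Int)
    (ts : List (Int × Int × Int)) (hj : j < seqs.length) (h1 : ¬ seqs.getD j 0 = c)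
    (h2 : seqs.getD j 0 > c) :
    pvWhileI seqs j c d ts =
      (seqs.set j (seqs.getD j 0 - c), j, d.insert (j : Int) (d.getD (j : Int) 0 + c),
        ts ++ [((j : Int), d.getD (j : Int) 0, d.getD (j : Int) 0 + c)]) := by
  have hg : seqs.getD j 0 = seqs[j] := by
    simp [List.getD_eq_getElem?_getD, List.getElem?_eq_getElem hj]
  rw [hg] at h1 h2
  rw [pvWhileI]; simp [hj, hg, h1, h2]

lemma whileI_lt (seqs : List Int) (j : Nat) (c : Int) (d : PySem.Dict Int Int)
    (ts : List (Int × Int × Int)) (hj : j < seqs.length) (h1 : ¬ seqs.getD j 0 = c)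
    (h2 : ¬ seqs.getD j 0 > c) :
    pvWhileI seqs j c d ts =
      pvWhileI seqs (j + 1) (c - seqs.getD j 0)
        (d.insert (j : Int) (d.getD (j : Int) 0 + seqs.getD j 0))
        (ts ++ [((j : Int), d.getD (j : Int) 0, d.getD (j : Int) 0 + seqs.getD j 0)]) := by
  have hg : seqs.getD j 0 = seqs[j] := by
    simp [List.getD_eq_getElem?_getD, List.getElem?_eq_getElem hj]
  rw [hg] at h1 h2
  rw [pvWhileI]; simp [hj, hg, h1, h2]

lemma whileS_stop (seqs : List Int) (j : Nat) (c p : Int) (ts : List (Int × Int × Int))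
    (hj : ¬ j < seqs.length) : pvWhileS seqs j c p ts = (seqs, j, p, ts) := by
  rw [pvWhileS]; simp [hj]

lemma whileS_eq (seqs : List Int) (j : Nat) (c p : Int) (ts : List (Int × Int × Int))
    (hj : j < seqs.length) (h1 : seqs.getD j 0 = c) :
    pvWhileS seqs j c p ts = (seqs, j + 1, 0, ts ++ [((j : Int), p, p + c)]) := by
  have hg : seqs.getD j 0 = seqs[j] := by
    simp [List.getD_eq_getElem?_getD, List.getElem?_eq_getElem hj]
  rw [hg] at h1
  rw [pvWhileS]; simp [hj, hg, h1]

lemma whileS_gt (seqs : List Int) (j : Nat) (c p : Int) (ts : List (Int × Int × Int))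
    (hj : j < seqs.length) (h1 : ¬ seqs.getD j 0 = c) (h2 : seqs.getD j 0 > c) :
    pvWhileS seqs j c p ts =
      (seqs.set j (seqs.getD j 0 - c), j, p + c, ts ++ [((j : Int), p, p + c)]) := by
  have hg : seqs.getD j 0 = seqs[j] := by
    simp [List.getD_eq_getElem?_getD, List.getElem?_eq_getElem hj]
  rw [hg] at h1 h2
  rw [pvWhileS]; simp [hj, hg, h1, h2]

lemma whileS_lt (seqs : List Int) (j : Nat) (c p : Int) (ts : List (Int × Int × Int))
    (hj : j < seqs.length) (h1 : ¬ seqs.getD j 0 = c) (h2 : ¬ seqs.getD j 0 > c) :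
    pvWhileS seqs j c p ts =
      pvWhileS seqs (j + 1) (c - seqs.getD j 0) 0
        (ts ++ [((j : Int), p, p + seqs.getD j 0)]) := by
  have hg : seqs.getD j 0 = seqs[j] := by
    simp [List.getD_eq_getElem?_getD, List.getElem?_eq_getElem hj]
  rw [hg] at h1 h2
  rw [pvWhileS]; simp [hj, hg, h1, h2]

-- ---- Stage 1: A's dict machinery equals the inline-tuple chunk-major loop pvWhileI ----

-- how A's post-loop reconstruction reads one (idx, val) entry of current_dict against cumulative
def pvReconstruct (cum : PySem.Dict Int Int) (p : Int × Int) : Int × Int × Int :=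
  (p.1, cum.getD p.1 0 - p.2, (cum.getD p.1 0 - p.2) + p.2)

-- one branch step: appending the tuple directly equals A's reconstruction of the grown
-- current_dict against the grown cumulative dict, when all earlier keys are below j
lemma pvStep (cum cur : PySem.Dict Int Int) (j : Nat) (amt : Int) (ts : List (Int × Int × Int))
    (hkeys : ∀ k ∈ cur.keys, k < (j : Int))
    (hts : ts = cur.items.map (pvReconstruct cum)) :
    ts ++ [((j : Int), cum.getD (j : Int) 0, cum.getD (j : Int) 0 + amt)] =
      (cur.insert (j : Int) amt).items.map
        (pvReconstruct (cum.insert (j : Int) (cum.getD (j : Int) 0 + amt))) := by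
  have hnc : cur.contains (j : Int) = false := by
    rw [PySem.Dict.contains_eq_decide_mem_keys]
    simp only [decide_eq_false_iff_not]
    intro hmem
    exact absurd (hkeys _ hmem) (lt_irrefl _)
  rw [PySem.Dict.items_insert_of_not_contains cur amt hnc, List.map_append, hts]
  congr 1
  · apply List.map_congr_left
    intro q hq
    have hlt : q.1 < (j : Int) := hkeys _ (PySem.Dict.mem_keys_of_mem_items cur hq)
    simp [pvReconstruct, PySem.Dict.getD_insert, hlt.ne]
  · simp [pvReconstruct, PySem.Dict.getD_insert_self, add_sub_cancel_right]

-- the inline loop equals A's inner loop followed by A's reconstruction pass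
lemma whileAI (n : Nat) : ∀ (seqs : List Int) (j : Nat) (c : Int)
    (cum cur : PySem.Dict Int Int) (ts : List (Int × Int × Int)),
    seqs.length - j ≤ n →
    (∀ k ∈ cur.keys, k < (j : Int)) →
    ts = cur.items.map (pvReconstruct cum) →
    pvWhileI seqs j c cum ts =
      ((pvWhileA seqs j c cum cur).1, (pvWhileA seqs j c cum cur).2.1,
       (pvWhileA seqs j c cum cur).2.2.1,
       (pvWhileA seqs j c cum cur).2.2.2.items.map
         (pvReconstruct (pvWhileA seqs j c cum cur).2.2.1)) := by
  induction n with
  | zero =>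
    intro seqs j c cum cur ts hn hkeys hts
    have hj : ¬ j < seqs.length := by omega
    rw [whileI_stop seqs j c cum ts hj, whileA_stop seqs j c cum cur hj]
    dsimp only
    exact Prod.ext rfl (Prod.ext rfl (Prod.ext rfl hts))
  | succ n ih =>
    intro seqs j c cum cur ts hn hkeys hts
    by_cases hj : j < seqs.length
    · by_cases h1 : seqs.getD j 0 = c
      · rw [whileI_eq seqs j c cum ts hj h1, whileA_eq seqs j c cum cur hj h1]
        dsimp only
        exact Prod.ext rfl (Prod.ext rfl (Prod.ext rfl (pvStep cum cur j c ts hkeys hts)))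
      · by_cases h2 : seqs.getD j 0 > c
        · rw [whileI_gt seqs j c cum ts hj h1 h2, whileA_gt seqs j c cum cur hj h1 h2]
          dsimp only
          exact Prod.ext rfl (Prod.ext rfl (Prod.ext rfl (pvStep cum cur j c ts hkeys hts)))
        · rw [whileI_lt seqs j c cum ts hj h1 h2, whileA_lt seqs j c cum cur hj h1 h2]
          apply ih seqs (j + 1) (c - seqs.getD j 0) _ _ _ (by omega)
          · intro k hk
            rcases (PySem.Dict.mem_keys_insert cur (j : Int) k (seqs.getD j 0)).mp hk with h | h
            · subst h; push_cast; omega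
            · have := hkeys _ h; push_cast; push_cast at this; omega
          · exact pvStep cum cur j (seqs.getD j 0) ts hkeys hts
    · rw [whileI_stop seqs j c cum ts hj, whileA_stop seqs j c cum cur hj]
      dsimp only
      exact Prod.ext rfl (Prod.ext rfl (Prod.ext rfl hts))

lemma loopAI (chunks : List Int) : ∀ (seqs : List Int) (j : Nat)
    (cum : PySem.Dict Int Int) (acc : List (List (Int × Int × Int))),
    pvLoopA chunks seqs j cum acc = pvLoopI chunks seqs j cum acc := by
  induction chunks with
  | nil => intro seqs j cum acc; rfl
  | cons c rest ih =>
    intro seqs j cum acc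
    have h := whileAI (seqs.length - j) seqs j c cum PySem.Dict.empty [] (le_refl _)
      (by intro k hk; simp [PySem.Dict.keys, PySem.Dict.empty] at hk) rfl
    simp only [pvLoopA, pvLoopI, h]
    exact ih _ _ _ _

-- ---- Stage 2: the consumed-dict collapses to a scalar (only the current index is read) ----

lemma pvGetD_not_mem (d : PySem.Dict Int Int) (k : Int) (h : k ∉ d.keys) : d.getD k 0 = 0 := by
  have hc : d.contains k = false := by
    rw [PySem.Dict.contains_eq_decide_mem_keys]; simp [h]
  have hn : d.get? k = none := (PySem.Dict.get?_eq_none_iff_contains d k).mpr hc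
  simp [PySem.Dict.getD, hn]

lemma whileIS (n : Nat) : ∀ (seqs : List Int) (j : Nat) (c : Int)
    (d : PySem.Dict Int Int) (ts : List (Int × Int × Int)),
    seqs.length - j ≤ n →
    (∀ k ∈ d.keys, k ≤ (j : Int)) →
    pvWhileS seqs j c (d.getD (j : Int) 0) ts =
      ((pvWhileI seqs j c d ts).1, (pvWhileI seqs j c d ts).2.1,
       (pvWhileI seqs j c d ts).2.2.1.getD (((pvWhileI seqs j c d ts).2.1 : Nat) : Int) 0,
       (pvWhileI seqs j c d ts).2.2.2)
    ∧ ∀ k ∈ (pvWhileI seqs j c d ts).2.2.1.keys,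
        k ≤ (((pvWhileI seqs j c d ts).2.1 : Nat) : Int) := by
  induction n with
  | zero =>
    intro seqs j c d ts hn hk
    have hj : ¬ j < seqs.length := by omega
    rw [whileS_stop seqs j c _ ts hj, whileI_stop seqs j c d ts hj]
    exact ⟨rfl, hk⟩
  | succ n ih =>
    intro seqs j c d ts hn hk
    by_cases hj : j < seqs.length
    · by_cases h1 : seqs.getD j 0 = c
      · have hnot : ((j + 1 : Nat) : Int) ∉ (d.insert (j : Int) (d.getD (j : Int) 0 + c)).keys := by
          intro hmem
          rcases (PySem.Dict.mem_keys_insert d (j : Int) _ _).mp hmem with h | h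
          · push_cast at h; omega
          · have := hk _ h; push_cast at this; omega
        rw [whileS_eq seqs j c _ ts hj h1, whileI_eq seqs j c d ts hj h1]
        refine ⟨?_, ?_⟩
        · dsimp only
          exact Prod.ext rfl (Prod.ext rfl
            (Prod.ext (pvGetD_not_mem _ _ hnot).symm rfl))
        · dsimp only
          intro k hkm
          rcases (PySem.Dict.mem_keys_insert d (j : Int) k _).mp hkm with h | h
          · subst h; push_cast; omega
          · have := hk _ h; push_cast; omega
      · by_cases h2 : seqs.getD j 0 > c
        · rw [whileS_gt seqs j c _ ts hj h1 h2, whileI_gt seqs j c d ts hj h1 h2]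
          refine ⟨?_, ?_⟩
          · dsimp only
            exact Prod.ext rfl (Prod.ext rfl
              (Prod.ext (PySem.Dict.getD_insert_self d (j : Int) _ 0).symm rfl))
          · dsimp only
            intro k hkm
            rcases (PySem.Dict.mem_keys_insert d (j : Int) k _).mp hkm with h | h
            · subst h; omega
            · exact hk _ h
        · have hkeys' : ∀ k ∈ (d.insert (j : Int) (d.getD (j : Int) 0 + seqs.getD j 0)).keys,
              k ≤ ((j + 1 : Nat) : Int) := by
            intro k hkm
            rcases (PySem.Dict.mem_keys_insert d (j : Int) k _).mp hkm with h | h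
            · subst h; push_cast; omega
            · have := hk _ h; push_cast; omega
          have hnot : ((j + 1 : Nat) : Int) ∉
              (d.insert (j : Int) (d.getD (j : Int) 0 + seqs.getD j 0)).keys := by
            intro hmem
            rcases (PySem.Dict.mem_keys_insert d (j : Int) _ _).mp hmem with h | h
            · push_cast at h; omega
            · have := hk _ h; push_cast at this; omega
          have hz := pvGetD_not_mem _ _ hnot
          rw [whileS_lt seqs j c _ ts hj h1 h2, whileI_lt seqs j c d ts hj h1 h2]
          have hrec := ih seqs (j + 1) (c - seqs.getD j 0)
            (d.insert (j : Int) (d.getD (j : Int) 0 + seqs.getD j 0))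
            (ts ++ [((j : Int), d.getD (j : Int) 0, d.getD (j : Int) 0 + seqs.getD j 0)])
            (by omega) hkeys'
          rw [hz] at hrec
          exact hrec
    · have hj' : ¬ j < seqs.length := hj
      rw [whileS_stop seqs j c _ ts hj', whileI_stop seqs j c d ts hj']
      exact ⟨rfl, hk⟩

-- outer chunk loop over pvWhileS
def pvLoopS : List Int → List Int → Nat → Int →
    List (List (Int × Int × Int)) → List (List (Int × Int × Int))
  | [], _, _, _, acc => acc.reverse
  | c :: rest, seqs, j, p, acc =>
    let r := pvWhileS seqs j c p []
    pvLoopS rest r.1 r.2.1 r.2.2.1 (r.2.2.2 :: acc)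

lemma loopIS (chunks : List Int) : ∀ (seqs : List Int) (j : Nat) (d : PySem.Dict Int Int)
    (acc : List (List (Int × Int × Int))), (∀ k ∈ d.keys, k ≤ (j : Int)) →
    pvLoopI chunks seqs j d acc = pvLoopS chunks seqs j (d.getD (j : Int) 0) acc := by
  induction chunks with
  | nil => intro seqs j d acc _; rfl
  | cons c rest ih =>
    intro seqs j d acc hk
    have h := whileIS (seqs.length - j) seqs j c d [] (le_refl _) hk
    simp only [pvLoopI, pvLoopS]
    rw [h.1]
    exact ih _ _ _ _ h.2

-- ---- Stage 3: the chunk-major scalar loop equals B's seq-major loop (loop interchange) ----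

-- A-side run from an arbitrary aligned point: mid-chunk (head of cs = remaining capacity)
-- with bucket-so-far cur, mid-seq j with consumed p
def pvRunA (cs : List Int) (seqs : List Int) (j : Nat) (p : Int)
    (cur : List (Int × Int × Int)) (acc : List (List (Int × Int × Int))) :
    List (List (Int × Int × Int)) :=
  match cs with
  | [] => acc.reverse
  | c :: rest =>
    let r := pvWhileS seqs j c p []
    pvLoopS rest r.1 r.2.1 r.2.2.1 ((cur ++ r.2.2.2) :: acc)

-- B's trailing padding (the `if rest:` block), as a function of the outer-loop result
def pvFinB (r : List Int × List (Int × Int × Int) × List (List (Int × Int × Int))) :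
    List (List (Int × Int × Int)) :=
  match r.1 with
  | [] => r.2.2
  | _ :: rs => r.2.2 ++ [r.2.1] ++ rs.map (fun _ => ([] : List (Int × Int × Int)))

-- B-side run from the same aligned point
def pvRunB (cs : List Int) (seqs : List Int) (j : Nat) (p : Int)
    (cur : List (Int × Int × Int)) (out : List (List (Int × Int × Int))) :
    List Int × List (Int × Int × Int) × List (List (Int × Int × Int)) :=
  if _h : j < seqs.length then
    let r := pvInnerB cs j (seqs.getD j 0) p cur out seqs
    pvOuterB (r.2.2.2.drop (j + 1)) (j + 1) r.1 r.2.1 r.2.2.1 r.2.2.2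
  else (cs, cur, out)

lemma outerB_nil_chunks (ss : List Int) : ∀ (j : Nat) (cur : List (Int × Int × Int))
    (out : List (List (Int × Int × Int))) (seqs : List Int),
    pvOuterB ss j [] cur out seqs = ([], cur, out) := by
  induction ss with
  | nil => intro j cur out seqs; rfl
  | cons s ss ih => intro j cur out seqs; simp only [pvOuterB, pvInnerB]; exact ih _ _ _ _

lemma innerB_drop (cs : List Int) : ∀ (j : Nat) (s p : Int) (cur : List (Int × Int × Int))
    (out : List (List (Int × Int × Int))) (seqs : List Int),
    (pvInnerB cs j s p cur out seqs).2.2.2.drop (j + 1) = seqs.drop (j + 1) := by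
  induction cs with
  | nil => intro j s p cur out seqs; rfl
  | cons c rs ih =>
    intro j s p cur out seqs
    simp only [pvInnerB]
    split_ifs with h1 h2
    · rfl
    · rw [ih]; simp [List.drop_set]
    · rfl

lemma outer_step (seqs : List Int) (j : Nat) (cs : List Int) (cur : List (Int × Int × Int))
    (out : List (List (Int × Int × Int))) :
    pvOuterB (seqs.drop j) j cs cur out seqs = pvRunB cs seqs j 0 cur out := by
  by_cases h : j < seqs.length
  · rw [List.drop_eq_getElem_cons h]
    simp only [pvOuterB, pvRunB, dif_pos h]
    rw [innerB_drop]
    have hg : seqs.getD j 0 = seqs[j] := by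
      simp [List.getD_eq_getElem?_getD, List.getElem?_eq_getElem h]
    rw [hg]
  · rw [List.drop_of_length_le (by omega)]
    simp only [pvOuterB, pvRunB, dif_neg h]

-- ts-accumulator lemma for pvWhileS
lemma whileS_append (n : Nat) : ∀ (seqs : List Int) (j : Nat) (c p : Int)
    (ts : List (Int × Int × Int)), seqs.length - j ≤ n →
    pvWhileS seqs j c p ts =
      ((pvWhileS seqs j c p []).1, (pvWhileS seqs j c p []).2.1,
       (pvWhileS seqs j c p []).2.2.1, ts ++ (pvWhileS seqs j c p []).2.2.2) := by
  induction n with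
  | zero =>
    intro seqs j c p ts hn
    have hj : ¬ j < seqs.length := by omega
    rw [whileS_stop seqs j c p ts hj, whileS_stop seqs j c p [] hj]
    simp
  | succ n ih =>
    intro seqs j c p ts hn
    by_cases hj : j < seqs.length
    · by_cases h1 : seqs.getD j 0 = c
      · rw [whileS_eq seqs j c p ts hj h1, whileS_eq seqs j c p [] hj h1]
        simp
      · by_cases h2 : seqs.getD j 0 > c
        · rw [whileS_gt seqs j c p ts hj h1 h2, whileS_gt seqs j c p [] hj h1 h2]
          simp
        · rw [whileS_lt seqs j c p ts hj h1 h2, whileS_lt seqs j c p [] hj h1 h2]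
          simp only [List.nil_append]
          rw [ih seqs (j + 1) (c - seqs.getD j 0) 0 _ (by omega),
              ih seqs (j + 1) (c - seqs.getD j 0) 0
                [((j : Int), p, p + seqs.getD j 0)] (by omega)]
          simp
    · rw [whileS_stop seqs j c p ts hj, whileS_stop seqs j c p [] hj]
      simp

-- A pads all remaining chunks with [] once the seqs are exhausted
lemma loopS_pad (rest : List Int) : ∀ (seqs : List Int) (j : Nat) (p : Int)
    (acc : List (List (Int × Int × Int))), ¬ j < seqs.length →
    pvLoopS rest seqs j p acc =
      acc.reverse ++ rest.map (fun _ => ([] : List (Int × Int × Int))) := by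
  induction rest with
  | nil => intro seqs j p acc _; simp [pvLoopS]
  | cons c rs ih =>
    intro seqs j p acc h
    simp only [pvLoopS, whileS_stop seqs j c p [] h]
    rw [ih _ _ _ _ h]
    simp

lemma runA_of_loopS (cs : List Int) (seqs : List Int) (j : Nat) (p : Int)
    (acc : List (List (Int × Int × Int))) :
    pvRunA cs seqs j p [] acc = pvLoopS cs seqs j p acc := by
  cases cs with
  | nil => rfl
  | cons c rest => simp only [pvRunA, pvLoopS, List.nil_append]

lemma runA_cons (c : Int) (rest : List Int) (seqs : List Int) (j : Nat) (p : Int)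
    (cur : List (Int × Int × Int)) (acc : List (List (Int × Int × Int))) :
    pvRunA (c :: rest) seqs j p cur acc =
      pvLoopS rest (pvWhileS seqs j c p []).1 (pvWhileS seqs j c p []).2.1
        (pvWhileS seqs j c p []).2.2.1
        ((cur ++ (pvWhileS seqs j c p []).2.2.2) :: acc) := rfl

-- the interchange: A's chunk-major run equals B's seq-major run, from any aligned point
lemma pvMain (n : Nat) : ∀ (cs : List Int) (seqs : List Int) (j : Nat) (p : Int)
    (cur : List (Int × Int × Int)) (acc : List (List (Int × Int × Int))),
    cs.length + (seqs.length - j) ≤ n →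
    pvRunA cs seqs j p cur acc = pvFinB (pvRunB cs seqs j p cur acc.reverse) := by
  induction n with
  | zero =>
    intro cs seqs j p cur acc hn
    have hcs : cs = [] := by cases cs <;> simp_all
    subst hcs
    by_cases hj : j < seqs.length
    · simp only [pvRunA, pvRunB, dif_pos hj, pvInnerB]
      rw [outerB_nil_chunks]
      rfl
    · simp only [pvRunA, pvRunB, dif_neg hj]
      rfl
  | succ n ih =>
    intro cs seqs j p cur acc hn
    cases cs with
    | nil =>
      by_cases hj : j < seqs.length
      · simp only [pvRunA, pvRunB, dif_pos hj, pvInnerB]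
        rw [outerB_nil_chunks]
        rfl
      · simp only [pvRunA, pvRunB, dif_neg hj]
        rfl
    | cons c rest =>
      by_cases hj : j < seqs.length
      · by_cases h1 : seqs.getD j 0 = c
        · -- equal: chunk finishes, seq advances
          have hA : pvRunA (c :: rest) seqs j p cur acc =
              pvRunA rest seqs (j + 1) 0 []
                ((cur ++ [((j : Int), p, p + c)]) :: acc) := by
            rw [runA_cons, whileS_eq seqs j c p [] hj h1, runA_of_loopS]
            rfl
          rw [hA, ih rest seqs (j + 1) 0 [] _ (by simp at hn ⊢; omega)]
          have hB : pvRunB (c :: rest) seqs j p cur acc.reverse =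
              pvRunB rest seqs (j + 1) 0 []
                (((cur ++ [((j : Int), p, p + c)]) :: acc)).reverse := by
            simp only [pvRunB, dif_pos hj, pvInnerB, if_pos h1]
            rw [outer_step seqs (j + 1) rest []]
            simp only [pvRunB]
            rw [List.getD_eq_getElem?_getD] at h1
            simp [h1]
          rw [hB]
        · by_cases h2 : seqs.getD j 0 > c
          · -- s > c: chunk finishes, seq j keeps remainder s - c
            have hlen : j < (seqs.set j (seqs.getD j 0 - c)).length := by simpa using hj
            have hgetD : (seqs.set j (seqs.getD j 0 - c)).getD j 0 = seqs.getD j 0 - c := by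
              simp [List.getD_eq_getElem?_getD, List.getElem?_set_self, hj]
            have hA : pvRunA (c :: rest) seqs j p cur acc =
                pvRunA rest (seqs.set j (seqs.getD j 0 - c)) j (p + c) []
                  ((cur ++ [((j : Int), p, p + c)]) :: acc) := by
              rw [runA_cons, whileS_gt seqs j c p [] hj h1 h2, runA_of_loopS]
              rfl
            rw [hA, ih rest (seqs.set j (seqs.getD j 0 - c)) j (p + c) [] _
              (by simp at hn ⊢; omega)]
            have hB : pvRunB (c :: rest) seqs j p cur acc.reverse =
                pvRunB rest (seqs.set j (seqs.getD j 0 - c)) j (p + c) []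
                  ((cur ++ [((j : Int), p, p + c)]) :: acc).reverse := by
              simp only [pvRunB, dif_pos hj, dif_pos hlen, pvInnerB, if_neg h1,
                if_pos h2, hgetD]
              simp
            rw [hB]
          · -- s < c: seq finishes inside the chunk
            have hA : pvRunA (c :: rest) seqs j p cur acc =
                pvRunA ((c - seqs.getD j 0) :: rest) seqs (j + 1) 0
                  (cur ++ [((j : Int), p, p + seqs.getD j 0)]) acc := by
              rw [runA_cons c rest seqs j p cur acc,
                runA_cons (c - seqs.getD j 0) rest seqs (j + 1) 0
                  (cur ++ [((j : Int), p, p + seqs.getD j 0)]) acc,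
                whileS_lt seqs j c p [] hj h1 h2]
              simp only [List.nil_append]
              rw [whileS_append (seqs.length - (j + 1)) seqs (j + 1) (c - seqs.getD j 0) 0
                [((j : Int), p, p + seqs.getD j 0)] (by omega)]
              simp [List.append_assoc]
            rw [hA, ih ((c - seqs.getD j 0) :: rest) seqs (j + 1) 0 _ acc
              (by simp at hn ⊢; omega)]
            have hB : pvRunB (c :: rest) seqs j p cur acc.reverse =
                pvRunB ((c - seqs.getD j 0) :: rest) seqs (j + 1) 0
                  (cur ++ [((j : Int), p, p + seqs.getD j 0)]) acc.reverse := by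
              simp only [pvRunB, dif_pos hj, pvInnerB, if_neg h1, if_neg h2]
              rw [outer_step seqs (j + 1)]
              simp only [pvRunB, pvInnerB]
            rw [hB]
      · -- seqs exhausted: A pads, B's else branch pads identically
        have hA : pvRunA (c :: rest) seqs j p cur acc =
            acc.reverse ++ [cur] ++ rest.map (fun _ => ([] : List (Int × Int × Int))) := by
          rw [runA_cons, whileS_stop seqs j c p [] hj, loopS_pad rest seqs j p _ hj]
          simp
        rw [hA]
        simp only [pvRunB, dif_neg hj, pvFinB]

-- ===== VERDICT (by name: the statement is the Claim_ definition above) =====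
theorem calculate_cp_seq_idx_spec : Claim_equal_calculate_cp_seq_idx := by
  intro cs ss _
  unfold Spec_calculate_cp_seq_idx calculate_cp_seq_idx calculate_cp_seq_idx_alt
  rw [loopAI, loopIS cs ss 0 PySem.Dict.empty []
    (by intro k hk; simp [PySem.Dict.keys, PySem.Dict.empty] at hk)]
  have hempty : (PySem.Dict.empty : PySem.Dict Int Int).getD ((0 : Nat) : Int) 0 = 0 := by
    decide
  rw [hempty, ← runA_of_loopS,
    pvMain (cs.length + ss.length) cs ss 0 0 [] [] (by omega)]
  simp only [List.reverse_nil]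
  have hstep := outer_step ss 0 cs [] []
  rw [List.drop_zero] at hstep
  rw [← hstep]
  rfl
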